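-- pv_equiv track=rewrite | github.com/npanuhin/Advent-of-Code | 2020/Day 16/part2.py | identify_fields
-- ===== SOURCE A (Python) =====
-- def identify_fields(possible_field_pos):
--     def gen(b=[]):
--         if len(b) == len(possible_field_pos):
--             return True
--
--         for item in possible_field_pos[len(b)][1]:
--             if item not in (item for i, item in b):
--                 b.append((possible_field_pos[len(b)][0], item))
--                 if gen(b) is not None:
--                     return b
--                 b.pop()
--
--     return gen()
-- ===== SOURCE B (Python) =====
-- def identify_fields(possible_field_pos):
--     def solve(fields, used):
--         if not fields:
--             return []
--         name, cands = fields[0]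
--         rest = fields[1:]
--         for item in cands:
--             if item not in used:
--                 tail = solve(rest, used | {item})
--                 if tail is not None:
--                     return [(name, item)] + tail
--         return None
--     return solve(possible_field_pos, frozenset())
-- ===== Notes on version B (the rewrite author's own statement) =====
-- stated objective: simpler
-- what changed: Replaces A's inner closure that mutates a shared accumulator list and indexes possible_field_pos by len(b) with a pure structural recursion over the remaining field list carrying an immutable used-set, consing the answer together on the way back instead of returning the mutated list.
-- outside the precondition, e.g. on identify_fields([]): A returns True, B returns []
import Mathlib
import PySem

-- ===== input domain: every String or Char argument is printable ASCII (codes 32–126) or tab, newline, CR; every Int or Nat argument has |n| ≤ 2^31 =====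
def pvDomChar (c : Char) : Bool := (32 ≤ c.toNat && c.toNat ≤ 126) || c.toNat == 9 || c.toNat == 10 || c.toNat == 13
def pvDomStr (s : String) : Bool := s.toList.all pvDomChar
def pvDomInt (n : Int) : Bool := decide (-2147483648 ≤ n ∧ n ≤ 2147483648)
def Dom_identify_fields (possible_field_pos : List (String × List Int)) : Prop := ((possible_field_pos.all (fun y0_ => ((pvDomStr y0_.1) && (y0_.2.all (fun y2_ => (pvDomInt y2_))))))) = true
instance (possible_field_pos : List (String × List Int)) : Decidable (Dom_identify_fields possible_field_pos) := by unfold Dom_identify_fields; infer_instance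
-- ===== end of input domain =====

-- B replaces A's mutating recursion over an index (len(b)) by pure structural recursion on the
-- remaining field list with an immutable used-set, building the answer back-to-front (objective: simpler).

-- ===== PORT A =====
-- gen(b): recursion indexed by len(b) into possible_field_pos, accumulating b at the end.
-- Python's `return True` at full depth is followed in every caller by `return b`, and b (mutated
-- in place) then holds exactly the full assignment, so the port returns `some b` there.
mutual
def identify_fields_gen (pf : List (String × List Int)) (b : List (String × Int)) :
    Option (List (String × Int)) :=
  if b.length = pf.length then some b
  else
    match _h : pf[b.length]? with
    | none => none  -- Python IndexError; unreachable from the top-level call gen([])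
    | some fc => identify_fields_loop pf b fc.1 fc.2 ((List.getElem?_eq_some_iff.mp _h).1)
  termination_by (pf.length - b.length, 1, 0)

-- the `for item in possible_field_pos[len(b)][1]:` loop of gen
def identify_fields_loop (pf : List (String × List Int)) (b : List (String × Int))
    (name : String) (cands : List Int) (hb : b.length < pf.length) :
    Option (List (String × Int)) :=
  match cands with
  | [] => none  -- loop falls through: gen returns None
  | item :: rest =>
    if item ∈ b.map Prod.snd then identify_fields_loop pf b name rest hb
    else
      match identify_fields_gen pf (b ++ [(name, item)]) with
      | some r => some r  -- `return b`; b has been mutated to exactly this full assignment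
      | none => identify_fields_loop pf b name rest hb  -- b.pop(); next candidate
  termination_by (pf.length - b.length, 0, cands.length)
end

def identify_fields (possible_field_pos : List (String × List Int)) :
    Option (List (String × Int)) :=
  identify_fields_gen possible_field_pos []

-- ===== PORT B =====
mutual
def identify_fields_solve (pf : List (String × List Int)) (used : PySem.Set Int) :
    Option (List (String × Int)) :=
  match pf with
  | [] => some []
  | (name, cands) :: rest => identify_fields_try name cands rest used
  termination_by (pf.length, 0)

-- the `for item in cands:` loop of solve
def identify_fields_try (name : String) (cands : List Int) (rest : List (String × List Int))
    (used : PySem.Set Int) : Option (List (String × Int)) :=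
  match cands with
  | [] => none
  | item :: more =>
    if PySem.Set.contains used item then identify_fields_try name more rest used
    else
      match identify_fields_solve rest (PySem.Set.add used item) with
      | some tail => some ((name, item) :: tail)
      | none => identify_fields_try name more rest used
  termination_by (rest.length, cands.length + 1)
end

def identify_fields_alt (possible_field_pos : List (String × List Int)) :
    Option (List (String × Int)) :=
  identify_fields_solve possible_field_pos PySem.Set.empty

-- ===== PRECONDITION & SPEC =====
-- Pre_ excludes only the empty list, on which A returns True — a value outside the declared
-- Option-of-list result type (B naturally returns the empty assignment [] there).
def Pre_identify_fields (possible_field_pos : List (String × List Int)) : Prop :=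
  possible_field_pos ≠ []
instance (possible_field_pos : List (String × List Int)) :
    Decidable (Pre_identify_fields possible_field_pos) := by
  unfold Pre_identify_fields; infer_instance

def pvWitness_identify_fields : (List (String × List Int)) := [("row", [0, 1]), ("seat", [1])]

def Spec_identify_fields (possible_field_pos : List (String × List Int)) (out : Option (List (String × Int))) : Prop := out = identify_fields_alt possible_field_pos
instance (possible_field_pos : List (String × List Int)) (out : Option (List (String × Int))) : Decidable (Spec_identify_fields possible_field_pos out) := by unfold Spec_identify_fields; infer_instance

-- ===== CLAIM (what is proved, stated in full; the proofs are below) =====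
def Claim_equal_identify_fields : Prop := ∀ (possible_field_pos : List (String × List Int)), Dom_identify_fields possible_field_pos → Pre_identify_fields possible_field_pos → Spec_identify_fields possible_field_pos (identify_fields possible_field_pos)

-- ===== LEMMAS AND PROOFS =====

-- The candidate loop of A equals the candidate loop of B on the tail of the field list, given
-- the induction hypothesis for one level deeper.
lemma identify_fields_inner (pf : List (String × List Int)) (b : List (String × Int))
    (used : PySem.Set Int) (name : String) (hlt : b.length < pf.length)
    (hmem : ∀ x : Int, x ∈ used ↔ x ∈ b.map Prod.snd)
    (ih : ∀ (used' : PySem.Set Int) (x : String × Int),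
      (∀ y : Int, y ∈ used' ↔ y ∈ (b ++ [x]).map Prod.snd) →
      identify_fields_gen pf (b ++ [x]) =
        Option.map (fun t => (b ++ [x]) ++ t)
          (identify_fields_solve (pf.drop (b.length + 1)) used')) :
    ∀ cands : List Int,
      identify_fields_loop pf b name cands hlt =
        Option.map (fun t => b ++ t)
          (identify_fields_try name cands (pf.drop (b.length + 1)) used) := by
  intro cands
  induction cands with
  | nil => rw [identify_fields_loop.eq_def, identify_fields_try.eq_def]; rfl
  | cons item more ihc =>
    rw [identify_fields_loop.eq_def, identify_fields_try.eq_def]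
    dsimp only
    have hcond : PySem.Set.contains used item = decide (item ∈ b.map Prod.snd) := by
      by_cases hin : item ∈ b.map Prod.snd
      · simp [hin, (hmem item).mpr hin]
      · simp only [hin, decide_false]
        by_cases hu : item ∈ used
        · exact absurd ((hmem item).mp hu) hin
        · simp [hu]
    by_cases hin : item ∈ b.map Prod.snd
    · rw [if_pos hin, if_pos (by rw [hcond]; simp [hin])]
      exact ihc
    · rw [if_neg hin, if_neg (by rw [hcond]; simp [hin])]
      have hrec := ih (PySem.Set.add used item) (name, item)
        (by
          intro y
          rw [PySem.Set.mem_add]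
          simp only [List.map_append, List.mem_append, hmem y, List.map_cons, List.map_nil,
            List.mem_cons, List.not_mem_nil, or_false])
      rw [hrec]
      cases hres : identify_fields_solve (pf.drop (b.length + 1)) (PySem.Set.add used item) with
      | none => simpa [hres] using ihc
      | some tail => simp

-- Invariant: gen on partial assignment b equals solve on the not-yet-assigned suffix of the
-- field list, with the used-set holding exactly the items of b, prefixed back with b.
lemma identify_fields_main :
    ∀ (n : Nat) (pf : List (String × List Int)) (b : List (String × Int)) (used : PySem.Set Int),
      pf.length - b.length = n → b.length ≤ pf.length →
      (∀ x : Int, x ∈ used ↔ x ∈ b.map Prod.snd) →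
      identify_fields_gen pf b =
        Option.map (fun t => b ++ t) (identify_fields_solve (pf.drop b.length) used) := by
  intro n
  induction n with
  | zero =>
    intro pf b used hdiff hle hmem
    have heq : b.length = pf.length := by omega
    rw [identify_fields_gen.eq_def, if_pos heq, heq, List.drop_length, identify_fields_solve.eq_def]
    simp
  | succ k ih =>
    intro pf b used hdiff hle hmem
    have hlt : b.length < pf.length := by omega
    have hget : pf[b.length]? = some pf[b.length] := List.getElem?_eq_getElem hlt
    rw [identify_fields_gen.eq_def, if_neg (by omega)]
    split
    · simp_all
    · rename_i fc hfc
      have hfc2 : fc = pf[b.length] := by rw [hget] at hfc; exact (Option.some.inj hfc).symm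
      have hdrop : pf.drop b.length = fc :: pf.drop (b.length + 1) := by
        rw [hfc2]; exact List.drop_eq_getElem_cons hlt
      rw [hdrop, identify_fields_solve.eq_def]
      obtain ⟨name, cands⟩ := fc
      show identify_fields_loop pf b name cands hlt = _
      exact identify_fields_inner pf b used name hlt hmem
        (fun used' x hmem' => by
          have h := ih pf (b ++ [x]) used' (by simp; omega) (by simp; omega) hmem'
          simpa using h) cands

-- ===== VERDICT (by name: the statement is the Claim_ definition above) =====
theorem identify_fields_spec : Claim_equal_identify_fields := by
  intro pf _ _
  unfold Spec_identify_fields identify_fields identify_fields_alt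
  have h := identify_fields_main (pf.length) pf [] PySem.Set.empty (by simp) (by simp)
    (by intro x; simp [PySem.Set.empty])
  simp only [List.length_nil, List.drop_zero] at h
  rw [h]
  cases identify_fields_solve pf PySem.Set.empty <;> simp
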